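-- pv_equiv track=rewrite | github.com/sammiqueen/adventOfCode | day1.py | listSorter
-- ===== SOURCE A (Python) =====
-- def listSorter(unsortedList):
--
--     sortedList = []
--
--     for i in range(len(unsortedList[1])):
--
--         firstValue = min(unsortedList[0])
--         unsortedList[0].remove(firstValue)
--
--         secondValue = min(unsortedList[1])
--         unsortedList[1].remove(secondValue)
--
--         sortedList.append([firstValue, secondValue, (abs(firstValue - secondValue))])
--
--     return(sortedList)
-- ===== SOURCE B (Python) =====
-- def listSorter(unsortedList):
--     # Sort both lists once and pair them positionally, instead of A's repeated
--     # min()+remove() extraction loop. Unlike A, does NOT mutate the input lists.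
--     firsts = sorted(unsortedList[0])
--     seconds = sorted(unsortedList[1])
--     return [[a, b, abs(a - b)] for a, b in zip(firsts, seconds)]
-- ===== Notes on version B (the rewrite author's own statement) =====
-- stated objective: simpler
-- what changed: Replaces the repeated min()+remove() extraction loop by sorting both lists once and zipping them positionally.
import Mathlib
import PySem

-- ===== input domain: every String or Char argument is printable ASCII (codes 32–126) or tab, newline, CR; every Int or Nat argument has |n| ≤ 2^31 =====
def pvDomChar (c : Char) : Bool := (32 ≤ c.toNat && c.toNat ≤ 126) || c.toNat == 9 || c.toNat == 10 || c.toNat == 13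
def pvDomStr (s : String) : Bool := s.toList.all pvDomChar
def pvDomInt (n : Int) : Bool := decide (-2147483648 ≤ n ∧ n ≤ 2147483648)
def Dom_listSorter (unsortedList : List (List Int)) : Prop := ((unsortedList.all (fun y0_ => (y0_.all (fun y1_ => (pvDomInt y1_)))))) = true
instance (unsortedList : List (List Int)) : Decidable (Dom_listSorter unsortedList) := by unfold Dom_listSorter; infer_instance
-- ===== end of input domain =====

-- B replaces A's repeated min()+remove() extraction loop by sorting both lists once
-- and zipping them positionally; A mutates the two input sublists in place, B does
-- not — the equivalence proved here is about the return value only.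

-- ===== PORT A =====
-- A's loop: runs len(unsortedList[1]) times (len taken before the mutation starts),
-- each round extracting the minimum of both working lists.
def listSorterGo (n : Nat) (l0 l1 : List Int) (acc : List (List Int)) : List (List Int) :=
  match n with
  | 0 => acc
  | Nat.succ k =>
    match PySem.List.min? l0 (fun x => x) with
    | none => acc  -- Python: min() of an empty list raises ValueError (excluded by Pre_)
    | some f =>
      let l0' := (PySem.List.remove? l0 f).getD l0
      match PySem.List.min? l1 (fun x => x) with
      | none => acc  -- ValueError, excluded by Pre_
      | some s =>
        let l1' := (PySem.List.remove? l1 s).getD l1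
        listSorterGo k l0' l1' (acc ++ [[f, s, |f - s|]])

def listSorter (unsortedList : List (List Int)) : List (List Int) :=
  let l0 := (PySem.List.pyGet? unsortedList 0).getD []   -- IndexError excluded by Pre_
  let l1 := (PySem.List.pyGet? unsortedList 1).getD []
  listSorterGo l1.length l0 l1 []

-- ===== PORT B =====
def listSorter_alt (unsortedList : List (List Int)) : List (List Int) :=
  let firsts := PySem.List.sorted ((PySem.List.pyGet? unsortedList 0).getD []) (fun x => x) false
  let seconds := PySem.List.sorted ((PySem.List.pyGet? unsortedList 1).getD []) (fun x => x) false
  (firsts.zip seconds).map (fun p => [p.1, p.2, |p.1 - p.2|])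

-- ===== PRECONDITION & SPEC =====
-- Pre_ excludes exactly the inputs on which A raises: fewer than two sublists
-- (IndexError on unsortedList[1]) or a second sublist longer than the first
-- (ValueError from min() once the first sublist is exhausted).
def Pre_listSorter (unsortedList : List (List Int)) : Prop :=
  2 ≤ unsortedList.length ∧
  (unsortedList.getD 1 []).length ≤ (unsortedList.getD 0 []).length
instance (unsortedList : List (List Int)) : Decidable (Pre_listSorter unsortedList) := by
  unfold Pre_listSorter; infer_instance
def pvWitness_listSorter : List (List Int) := [[3, 1, 2], [2, 2]]


def Spec_listSorter (unsortedList : List (List Int)) (out : List (List Int)) : Prop :=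
  out = listSorter_alt unsortedList
instance (unsortedList : List (List Int)) (out : List (List Int)) : Decidable (Spec_listSorter unsortedList out) := by unfold Spec_listSorter; infer_instance

-- ===== CLAIM (what is proved, stated in full; the proofs are below) =====
def Claim_equal_listSorter : Prop := ∀ (unsortedList : List (List Int)), Dom_listSorter unsortedList → Pre_listSorter unsortedList → Spec_listSorter unsortedList (listSorter unsortedList)

-- ===== LEMMAS AND PROOFS =====

-- min() of a nonempty list is the head of its sorted version.
lemma min?_eq_sorted_head (l : List Int) (m : Int) (t : List Int)
    (h : PySem.List.sorted l (fun x => x) false = m :: t) :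
    PySem.List.min? l (fun x => x) = some m := by
  have hm : m ∈ l := by
    have : m ∈ PySem.List.sorted l (fun x => x) false := by rw [h]; exact List.mem_cons_self
    rwa [PySem.List.mem_sorted] at this
  have hne : l ≠ [] := List.ne_nil_of_mem hm
  obtain ⟨v, hv⟩ : ∃ v, PySem.List.min? l (fun x => x) = some v := by
    cases hv : PySem.List.min? l (fun x => x) with
    | none => exact absurd ((PySem.List.min?_eq_none_iff l _).mp hv) hne
    | some v => exact ⟨v, rfl⟩
  have h1 : m ≤ v := PySem.List.key_head_sorted_le l (fun x => x) h v (PySem.List.min?_mem hv)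
  have h2 : v ≤ m := PySem.List.min?_isMin hv m hm
  rw [hv]; exact congrArg some (le_antisymm h2 h1)

-- removing the minimum leaves a list whose sorted version is the tail.
lemma sorted_erase_head (l : List Int) (m : Int) (t : List Int)
    (h : PySem.List.sorted l (fun x => x) false = m :: t) :
    PySem.List.sorted (l.erase m) (fun x => x) false = t := by
  have hperm : (m :: t).Perm l := h ▸ PySem.List.sorted_perm l (fun x => x) false
  have hperm' : t.Perm (l.erase m) := by
    have := hperm.erase m
    simpa using this
  have hpw : t.Pairwise (fun a b : Int => a ≤ b) := by
    have := PySem.List.sorted_pairwise l (fun x : Int => x)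
    rw [h] at this
    exact this.of_cons
  exact PySem.List.sorted_id_eq_of_perm_of_pairwise _ _ hperm' hpw

-- A's extraction loop computes the zipped prefixes of the two sorted lists.
lemma listSorterGo_eq (n : Nat) : ∀ (l0 l1 : List Int) (acc : List (List Int)),
    n ≤ l0.length → n ≤ l1.length →
    listSorterGo n l0 l1 acc =
      acc ++ (((PySem.List.sorted l0 (fun x => x) false).take n).zip
              ((PySem.List.sorted l1 (fun x => x) false).take n)).map
             (fun p => [p.1, p.2, |p.1 - p.2|]) := by
  induction n with
  | zero => intro l0 l1 acc _ _; simp [listSorterGo]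
  | succ k ih =>
    intro l0 l1 acc h0 h1
    cases hs0 : PySem.List.sorted l0 (fun x => x) false with
    | nil =>
      have : l0 = [] := (PySem.List.sorted_eq_nil_iff _ _ _).mp hs0
      subst this; simp at h0
    | cons m0 t0 =>
    cases hs1 : PySem.List.sorted l1 (fun x => x) false with
    | nil =>
      have : l1 = [] := (PySem.List.sorted_eq_nil_iff _ _ _).mp hs1
      subst this; simp at h1
    | cons m1 t1 =>
    have hm0 : m0 ∈ l0 := by
      have : m0 ∈ PySem.List.sorted l0 (fun x => x) false := by rw [hs0]; exact List.mem_cons_self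
      rwa [PySem.List.mem_sorted] at this
    have hm1 : m1 ∈ l1 := by
      have : m1 ∈ PySem.List.sorted l1 (fun x => x) false := by rw [hs1]; exact List.mem_cons_self
      rwa [PySem.List.mem_sorted] at this
    have hrec := ih (l0.erase m0) (l1.erase m1) (acc ++ [[m0, m1, |m0 - m1|]])
      (by rw [List.length_erase_of_mem hm0]; omega)
      (by rw [List.length_erase_of_mem hm1]; omega)
    rw [sorted_erase_head l0 m0 t0 hs0, sorted_erase_head l1 m1 t1 hs1] at hrec
    simp only [listSorterGo, min?_eq_sorted_head l0 m0 t0 hs0, min?_eq_sorted_head l1 m1 t1 hs1,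
      PySem.List.remove?_eq_some_erase l0 m0 hm0, PySem.List.remove?_eq_some_erase l1 m1 hm1,
      Option.getD_some]
    rw [hrec]
    simp [List.take_succ_cons, List.zip_cons_cons]

-- zipping against a list of length ≤ n ignores any truncation of the left list at n.
lemma zip_take_left (s0 s1 : List Int) (n : Nat) (h : s1.length ≤ n) :
    (s0.take n).zip s1 = s0.zip s1 := by
  induction s0 generalizing s1 n with
  | nil => simp
  | cons a s0 ih =>
    cases s1 with
    | nil => simp
    | cons b s1 =>
      cases n with
      | zero => simp at h
      | succ n => simp_all

-- ===== VERDICT (by name: the statement is the Claim_ definition above) =====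
theorem listSorter_spec : Claim_equal_listSorter := by
  intro u _ hpre
  obtain ⟨hlen, hle⟩ := hpre
  have h0 : PySem.List.pyGet? u 0 = u[0]? := by
    exact_mod_cast PySem.List.pyGet?_natCast u 0
  have h1 : PySem.List.pyGet? u 1 = u[1]? := by
    exact_mod_cast PySem.List.pyGet?_natCast u 1
  rw [List.getD_eq_getElem?_getD, List.getD_eq_getElem?_getD] at hle
  show listSorter u = listSorter_alt u
  simp only [listSorter, listSorter_alt, h0, h1]
  rw [listSorterGo_eq _ _ _ _ hle (le_refl _)]
  rw [List.take_of_length_le (le_of_eq (PySem.List.length_sorted _ _ _)),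
      zip_take_left _ _ _ (le_of_eq (PySem.List.length_sorted _ _ _))]
  simp
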